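-- pv_equiv track=rewrite | github.com/donghyun-daniel/PS | BOJ/P1.py | solution
-- ===== SOURCE A (Python) =====
-- def get_cost(land,P,Q,target,N):
--     cost=0
--     for i in range(N):
--         for j in range(N):
--             diff=target-land[i][j]
--             if diff>0:
--                 cost+=P*diff
--             else:
--                 cost-=Q*diff
--     return cost
--
-- def solution(land, P, Q):
--     N=len(land)
--     min_v,max_v=1111111111,0
--     for row in land:
--         if min(row) < min_v:
--             min_v = min(row)
--         if max(row) > max_v:
--             max_v = max(row)
--     mid=(min_v+max_v)//2
--     while min_v<mid<max_v:
--         l=get_cost(land,P,Q,mid-1,N)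
--         h=get_cost(land,P,Q,mid+1,N)
--         if l<h:
--             max_v=mid
--         else:
--             min_v=mid
--         mid = (min_v + max_v) // 2
--     ans=[get_cost(land,P,Q,mid,N),get_cost(land,P,Q,mid-1,N),get_cost(land,P,Q,mid+1,N)]
--
--     return min(ans)
--
-- land=[[4, 4, 3], [3, 2, 2], [ 2, 1, 0 ]]
--
-- P=5
--
-- Q=3
-- ===== SOURCE B (Python) =====
-- # B: sort the N x N block once and keep prefix sums, so each cost query is
-- # O(log n) via binary search instead of A's O(N^2) rescan; the search over
-- # targets is the same. Bounds (as in A) come from all row entries.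
-- def solution(land, P, Q):
--     N = len(land)
--     vals = sorted(row[j] for row in land for j in range(N))
--     n = len(vals)
--     pref = [0]
--     for v in vals:
--         pref.append(pref[-1] + v)
--     total = pref[n]
--
--     def cost(t):
--         # k = bisect_left(vals, t): number of values strictly below t
--         lo, hi = 0, n
--         while lo < hi:
--             m = (lo + hi) // 2
--             if vals[m] < t:
--                 lo = m + 1
--             else:
--                 hi = m
--         k = lo
--         return P * (k * t - pref[k]) + Q * ((total - pref[k]) - (n - k) * t)
--
--     allv = [v for row in land for v in row]
--     lo = min(allv + [1111111111])
--     hi = max(allv + [0])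
--     mid = (lo + hi) // 2
--     while lo < mid < hi:
--         if cost(mid - 1) < cost(mid + 1):
--             hi = mid
--         else:
--             lo = mid
--         mid = (lo + hi) // 2
--     return min(cost(mid), cost(mid - 1), cost(mid + 1))
-- ===== Notes on version B (the rewrite author's own statement) =====
-- stated objective: faster
-- what changed: B sorts the N x N block once and keeps prefix sums, so each cost(target) query inside the same target search is answered by a bisect plus a closed formula instead of A's O(N^2) rescan of the whole grid.
import Mathlib
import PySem

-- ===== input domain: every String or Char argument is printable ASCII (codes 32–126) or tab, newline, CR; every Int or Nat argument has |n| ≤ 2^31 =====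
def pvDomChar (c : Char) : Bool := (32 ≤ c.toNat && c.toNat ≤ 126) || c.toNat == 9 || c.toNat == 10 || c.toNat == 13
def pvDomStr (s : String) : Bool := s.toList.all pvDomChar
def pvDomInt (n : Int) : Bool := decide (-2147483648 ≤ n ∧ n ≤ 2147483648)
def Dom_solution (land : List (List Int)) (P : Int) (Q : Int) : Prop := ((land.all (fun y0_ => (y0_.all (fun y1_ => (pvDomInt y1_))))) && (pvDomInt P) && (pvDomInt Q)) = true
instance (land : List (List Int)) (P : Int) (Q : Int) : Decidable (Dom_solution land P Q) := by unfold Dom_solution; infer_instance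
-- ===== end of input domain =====

-- B replaces A's O(N^2) rescan of the grid per cost query by one sort of the
-- N x N block plus prefix sums, answering each cost query by binary search;
-- the search over target heights is unchanged.

-- ===== PORT A =====
-- land[i][j] / min(row) / max(row) are ported with pyGetD / min? / max? plus a
-- default; exact under Pre_solution (indices in range, rows nonempty).
def get_cost (land : List (List Int)) (P : Int) (Q : Int) (target : Int) (N : Int) : Int :=
  (PySem.List.pyRange 0 N).foldl (fun cost i =>
    (PySem.List.pyRange 0 N).foldl (fun cost j =>
      let diff := target - PySem.List.pyGetD (PySem.List.pyGetD land i []) j 0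
      if diff > 0 then cost + P * diff else cost - Q * diff) cost) 0

def solLoopA (land : List (List Int)) (P : Int) (Q : Int) (N : Int)
    (minv maxv mid : Int) : Int :=
  if _h : minv < mid ∧ mid < maxv then
    let l := get_cost land P Q (mid - 1) N
    let hc := get_cost land P Q (mid + 1) N
    if l < hc then
      solLoopA land P Q N minv mid (PySem.Int.floordiv (minv + mid) 2)
    else
      solLoopA land P Q N mid maxv (PySem.Int.floordiv (mid + maxv) 2)
  else mid
termination_by (maxv - minv).toNat
decreasing_by
  · omega
  · omega

def solution (land : List (List Int)) (P : Int) (Q : Int) : Int :=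
  let N : Int := (land.length : Int)
  let mm := land.foldl (fun mv row =>
    (if (PySem.List.min? row (fun x => x)).getD 0 < mv.1
       then (PySem.List.min? row (fun x => x)).getD 0 else mv.1,
     if (PySem.List.max? row (fun x => x)).getD 0 > mv.2
       then (PySem.List.max? row (fun x => x)).getD 0 else mv.2)) (1111111111, 0)
  let mid := solLoopA land P Q N mm.1 mm.2 (PySem.Int.floordiv (mm.1 + mm.2) 2)
  let ans := [get_cost land P Q mid N, get_cost land P Q (mid - 1) N,
              get_cost land P Q (mid + 1) N]
  (PySem.List.min? ans (fun x => x)).getD 0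

-- ===== PORT B =====
-- pref = [0]; for v in vals: pref.append(pref[-1] + v)
def prefScan : List Int → Int → List Int
  | [], acc => [acc]
  | v :: rest, acc => acc :: prefScan rest (acc + v)

-- cost(t): k = Source B's hand-written bisect_left(vals, t), ported as
-- PySem.List.bisectLeft (the same lo/hi binary search); then the prefix-sum formula.
def costB (P Q : Int) (vals pref : List Int) (n : Nat) (total t : Int) : Int :=
  let k := PySem.List.bisectLeft vals t
  let pk := pref.getD k 0
  P * ((k : Int) * t - pk) + Q * ((total - pk) - ((n : Int) - (k : Int)) * t)

def solLoopB (P Q : Int) (vals pref : List Int) (n : Nat) (total : Int)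
    (lo hi mid : Int) : Int :=
  if _h : lo < mid ∧ mid < hi then
    if costB P Q vals pref n total (mid - 1) < costB P Q vals pref n total (mid + 1) then
      solLoopB P Q vals pref n total lo mid (PySem.Int.floordiv (lo + mid) 2)
    else
      solLoopB P Q vals pref n total mid hi (PySem.Int.floordiv (mid + hi) 2)
  else mid
termination_by (hi - lo).toNat
decreasing_by
  · omega
  · omega

def solution_alt (land : List (List Int)) (P : Int) (Q : Int) : Int :=
  let N := land.length
  -- row[j] for j in range(N): pyGetD is exact under Pre_solution (j < len(row))
  let vals := PySem.List.sorted
    (land.flatMap (fun row => (PySem.List.pyRange 0 (N : Int)).map (fun j => PySem.List.pyGetD row j 0)))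
    (fun x => x) false
  let n := vals.length
  let pref := prefScan vals 0
  let total := pref.getD n 0
  let allv := land.flatMap (fun row => row)
  let lo := (PySem.List.min? (allv ++ [1111111111]) (fun x => x)).getD 0
  let hi := (PySem.List.max? (allv ++ [0]) (fun x => x)).getD 0
  let mid := solLoopB P Q vals pref n total lo hi (PySem.Int.floordiv (lo + hi) 2)
  min (costB P Q vals pref n total mid)
    (min (costB P Q vals pref n total (mid - 1)) (costB P Q vals pref n total (mid + 1)))

-- ===== PRECONDITION & SPEC =====
-- A indexes land[i][j] for i, j < len(land): it raises IndexError (or ValueError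
-- from min([])) exactly when some row is shorter than len(land).
def Pre_solution (land : List (List Int)) (P : Int) (Q : Int) : Prop :=
  ∀ row ∈ land, land.length ≤ row.length
instance (land : List (List Int)) (P : Int) (Q : Int) : Decidable (Pre_solution land P Q) := by
  unfold Pre_solution; infer_instance

def pvWitness_solution : List (List Int) × Int × Int := ([[4, 4, 3], [3, 2, 2], [2, 1, 0]], 5, 3)

def Spec_solution (land : List (List Int)) (P : Int) (Q : Int) (out : Int) : Prop := out = solution_alt land P Q
instance (land : List (List Int)) (P : Int) (Q : Int) (out : Int) : Decidable (Spec_solution land P Q out) := by unfold Spec_solution; infer_instance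

-- ===== CLAIM (what is proved, stated in full; the proofs are below) =====
def Claim_equal_solution : Prop := ∀ (land : List (List Int)) (P : Int) (Q : Int), Dom_solution land P Q → Pre_solution land P Q → Spec_solution land P Q (solution land P Q)


-- ===== LEMMAS AND PROOFS =====

-- per-cell leveling cost
def pvCell (P Q t v : Int) : Int := if t - v > 0 then P * (t - v) else -(Q * (t - v))

theorem pv_sum_lt (P Q t : Int) (l : List Int) (h : ∀ v ∈ l, v < t) :
    (l.map (pvCell P Q t)).sum = P * ((l.length : Int) * t - l.sum) := by
  induction l with
  | nil => simp
  | cons x xs ih =>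
    have hx : x < t := h x (by simp)
    have := ih (fun v hv => h v (by simp [hv]))
    simp only [List.map_cons, List.sum_cons, List.length_cons, this, pvCell]
    rw [if_pos (by omega)]; push_cast; ring
theorem pv_sum_ge (P Q t : Int) (l : List Int) (h : ∀ v ∈ l, t ≤ v) :
    (l.map (pvCell P Q t)).sum = Q * (l.sum - (l.length : Int) * t) := by
  induction l with
  | nil => simp
  | cons x xs ih =>
    have hx : t ≤ x := h x (by simp)
    have := ih (fun v hv => h v (by simp [hv]))
    simp only [List.map_cons, List.sum_cons, List.length_cons, this, pvCell]
    rw [if_neg (by omega)]; push_cast; ring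
theorem prefScan_getD (s : List Int) (a : Int) (k : Nat) (hk : k ≤ s.length) :
    (prefScan s a).getD k 0 = a + (s.take k).sum := by
  induction s generalizing a k with
  | nil =>
    have : k = 0 := by simpa using hk
    simp [this, prefScan]
  | cons x xs ih =>
    cases k with
    | zero => simp [prefScan]
    | succ k =>
      simp only [prefScan, List.getD_cons_succ, List.take_succ_cons, List.sum_cons]
      rw [ih (a + x) k (by simpa using hk)]; ring
theorem costB_eq_sum (P Q t : Int) (block : List Int) :
    costB P Q (PySem.List.sorted block (fun x => x) false)
      (prefScan (PySem.List.sorted block (fun x => x) false) 0)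
      (PySem.List.sorted block (fun x => x) false).length
      ((prefScan (PySem.List.sorted block (fun x => x) false) 0).getD
        (PySem.List.sorted block (fun x => x) false).length 0) t =
      (block.map (pvCell P Q t)).sum := by
  set s := PySem.List.sorted block (fun x => x) false with hs
  have hperm : s.Perm block := PySem.List.sorted_perm block (fun x => x) false
  have hsorted : List.Pairwise (fun a b => a ≤ b) s := by
    simpa using PySem.List.sorted_pairwise block (fun x : Int => x)
  obtain ⟨hk, hlt, hge⟩ := PySem.List.bisectLeft_spec s t hsorted
  set k := PySem.List.bisectLeft s t with hkdef
  have hsum : (block.map (pvCell P Q t)).sum = (s.map (pvCell P Q t)).sum :=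
    ((hperm.map (pvCell P Q t)).sum_eq).symm
  have hpk : (prefScan s 0).getD k 0 = (s.take k).sum := by
    rw [prefScan_getD s 0 k hk]; ring
  have htot : (prefScan s 0).getD s.length 0 = s.sum := by
    rw [prefScan_getD s 0 s.length le_rfl]; simp
  have hsplit : (s.map (pvCell P Q t)).sum =
      ((s.take k).map (pvCell P Q t)).sum + ((s.drop k).map (pvCell P Q t)).sum := by
    conv_lhs => rw [← List.take_append_drop k s]
    rw [List.map_append, List.sum_append]
  have htk : ((s.take k).map (pvCell P Q t)).sum
      = P * (((s.take k).length : Int) * t - (s.take k).sum) := by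
    refine pv_sum_lt P Q t _ (fun v hv => ?_)
    obtain ⟨i, hi, rfl⟩ := List.mem_iff_getElem.1 hv
    have hik : i < k := by have := hi; simp [List.length_take] at this; omega
    rw [List.getElem_take]
    exact hlt i (by omega) hik
  have hdk : ((s.drop k).map (pvCell P Q t)).sum
      = Q * ((s.drop k).sum - (((s.drop k).length : Int)) * t) := by
    refine pv_sum_ge P Q t _ (fun v hv => ?_)
    obtain ⟨i, hi, rfl⟩ := List.mem_iff_getElem.1 hv
    rw [List.getElem_drop]
    have hi' : i < s.length - k := by simpa using hi
    exact hge (k + i) (by omega) (by omega)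
  have hlen_take : ((s.take k).length : Int) = (k : Int) := by
    simp [List.length_take]; omega
  have hlen_drop : ((s.drop k).length : Int) = (s.length : Int) - (k : Int) := by
    simp [List.length_drop]; omega
  have hsum_drop : (s.drop k).sum = s.sum - (s.take k).sum := by
    have := List.take_append_drop k s
    have h2 : (s.take k).sum + (s.drop k).sum = s.sum := by
      conv_rhs => rw [← this]
      rw [List.sum_append]
    omega
  simp only [costB, ← hkdef, hpk, htot]
  rw [hsum, hsplit, htk, hdk, hlen_take, hlen_drop, hsum_drop]

theorem pv_inner_sum (f : Int → Int) (row : List Int) (N : Nat) (h : N ≤ row.length) :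
    ((List.range N).map (fun j => f (row.getD j 0))).sum = ((row.take N).map f).sum := by
  induction N with
  | zero => simp
  | succ n ih =>
    rw [List.range_succ, List.map_append, List.sum_append, ih (by omega)]
    have hn : n < row.length := by omega
    rw [List.take_add_one]
    simp [List.getD, hn]
theorem pv_inner_fold (P Q t : Int) (row : List Int) (N : Nat) (h : N ≤ row.length) (acc : Int) :
    (PySem.List.pyRange 0 (N : Int)).foldl (fun cost j =>
      let diff := t - PySem.List.pyGetD row j 0
      if diff > 0 then cost + P * diff else cost - Q * diff) acc
    = acc + ((row.take N).map (pvCell P Q t)).sum := by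
  rw [PySem.List.pyRange_zero_natCast, List.foldl_map]
  have hf : (fun (cost : Int) (j : Nat) =>
      let diff := t - PySem.List.pyGetD row (↑j) 0
      if diff > 0 then cost + P * diff else cost - Q * diff)
      = (fun (cost : Int) (j : Nat) => cost + pvCell P Q t (row.getD j 0)) := by
    funext cost j
    simp only [PySem.List.pyGetD_natCast, pvCell]
    split <;> ring
  rw [hf, PySem.List.foldl_add, pv_inner_sum (pvCell P Q t) row N h]
theorem get_cost_eq_sum (land : List (List Int)) (P Q t : Int)
    (hpre : ∀ row ∈ land, land.length ≤ row.length) :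
    get_cost land P Q t (land.length : Int) =
      ((land.flatMap (fun row => row.take land.length)).map (pvCell P Q t)).sum := by
  unfold get_cost
  rw [PySem.List.foldl_pyRange_zero_pyGetD' land ([] : List Int)
      (fun acc row => (PySem.List.pyRange 0 ((land.length : Nat) : Int)).foldl (fun cost j =>
        let diff := t - PySem.List.pyGetD row j 0
        if diff > 0 then cost + P * diff else cost - Q * diff) acc) 0]
  rw [PySem.List.foldl_congr_mem land _
      (fun acc row => acc + ((row.take land.length).map (pvCell P Q t)).sum) 0
      (fun acc row hrow => pv_inner_fold P Q t row land.length (hpre row hrow) acc)]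
  rw [PySem.List.foldl_add]
  rw [List.map_flatMap]
  rw [List.flatMap_def, List.sum_flatten, List.map_map]
  simp [Function.comp_def]

theorem pv_foldl_min_min (l : List Int) (a b : Int) :
    l.foldl min (min a b) = min (l.foldl min a) b := by
  induction l generalizing a with
  | nil => rfl
  | cons x xs ih =>
    simp only [List.foldl_cons]
    rw [show min (min a b) x = min (min a x) b by omega, ih]
theorem pv_foldl_max_max (l : List Int) (a b : Int) :
    l.foldl max (max a b) = max (l.foldl max a) b := by
  induction l generalizing a with
  | nil => rfl
  | cons x xs ih =>
    simp only [List.foldl_cons]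
    rw [show max (max a b) x = max (max a x) b by omega, ih]
theorem pv_scan_acc (land : List (List Int)) (hne : ∀ row ∈ land, row ≠ []) (a b : Int) :
    land.foldl (fun mv row =>
      (if (PySem.List.min? row (fun x => x)).getD 0 < mv.1
         then (PySem.List.min? row (fun x => x)).getD 0 else mv.1,
       if (PySem.List.max? row (fun x => x)).getD 0 > mv.2
         then (PySem.List.max? row (fun x => x)).getD 0 else mv.2)) (a, b) =
      ((land.flatMap (fun row => row)).foldl min a,
       (land.flatMap (fun row => row)).foldl max b) := by
  induction land generalizing a b with
  | nil => simp
  | cons row rest ih =>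
    obtain ⟨x, t, rfl⟩ : ∃ x t, row = x :: t := by
      cases row with
      | nil => exact absurd rfl (hne [] (by simp))
      | cons x t => exact ⟨x, t, rfl⟩
    simp only [List.foldl_cons, List.flatMap_cons, List.foldl_append]
    rw [PySem.List.min?_id_cons, PySem.List.max?_id_cons]
    simp only [Option.getD_some]
    rw [ih (fun r hr => hne r (by simp [hr]))]
    have h1 : (if t.foldl min x < a then t.foldl min x else a) = t.foldl min (min a x) := by
      rw [show min a x = min x a by omega, pv_foldl_min_min]
      omega
    have h2 : (if t.foldl max x > b then t.foldl max x else b) = t.foldl max (max b x) := by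
      rw [show max b x = max x b by omega, pv_foldl_max_max]
      omega
    rw [h1, h2]
theorem pv_min_sentinel (flat : List Int) :
    (PySem.List.min? (flat ++ [1111111111]) (fun x => x)).getD 0 = flat.foldl min 1111111111 := by
  cases flat with
  | nil => simp [PySem.List.min?_id_cons]
  | cons x t =>
    rw [List.cons_append, PySem.List.min?_id_cons, Option.getD_some, List.foldl_append,
        List.foldl_cons, List.foldl_nil]
    conv_rhs => rw [List.foldl_cons]
    rw [show min 1111111111 x = min x 1111111111 by omega, pv_foldl_min_min]
theorem pv_max_sentinel (flat : List Int) :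
    (PySem.List.max? (flat ++ [0]) (fun x => x)).getD 0 = flat.foldl max 0 := by
  cases flat with
  | nil => simp [PySem.List.max?_id_cons]
  | cons x t =>
    rw [List.cons_append, PySem.List.max?_id_cons, Option.getD_some, List.foldl_append,
        List.foldl_cons, List.foldl_nil]
    conv_rhs => rw [List.foldl_cons]
    rw [show max 0 x = max x 0 by omega, pv_foldl_max_max]

theorem pv_loop_eq (land : List (List Int)) (P Q N : Int) (vals pref : List Int)
    (n : Nat) (total : Int)
    (hc : ∀ t, get_cost land P Q t N = costB P Q vals pref n total t) :
    ∀ lo hi mid, solLoopA land P Q N lo hi mid = solLoopB P Q vals pref n total lo hi mid := by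
  have main : ∀ m lo hi mid, (hi - lo).toNat ≤ m →
      solLoopA land P Q N lo hi mid = solLoopB P Q vals pref n total lo hi mid := by
    intro m
    induction m with
    | zero =>
      intro lo hi mid h
      rw [solLoopA, solLoopB, dif_neg (by omega), dif_neg (by omega)]
    | succ m ih =>
      intro lo hi mid h
      rw [solLoopA, solLoopB]
      by_cases hcond : lo < mid ∧ mid < hi
      · rw [dif_pos hcond, dif_pos hcond]
        simp only [hc (mid - 1), hc (mid + 1)]
        split_ifs with hlh
        · exact ih lo mid _ (by omega)
        · exact ih mid hi _ (by omega)
      · rw [dif_neg hcond, dif_neg hcond]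
  intro lo hi mid
  exact main (hi - lo).toNat lo hi mid le_rfl

theorem pv_min3 (a b c : Int) :
    (PySem.List.min? [a, b, c] (fun x => x)).getD 0 = min a (min b c) := by
  rw [PySem.List.min?_id_cons, Option.getD_some]
  simp only [List.foldl_cons, List.foldl_nil]
  omega

theorem pv_block_eq (land : List (List Int))
    (hpre : ∀ row ∈ land, land.length ≤ row.length) :
    land.flatMap (fun row => (PySem.List.pyRange 0 ((land.length : Nat) : Int)).map
      (fun j => PySem.List.pyGetD row j 0)) =
    land.flatMap (fun row => row.take land.length) := by
  rw [List.flatMap_def, List.flatMap_def]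
  congr 1
  refine List.map_congr_left (fun row hrow => ?_)
  rw [PySem.List.pyRange_zero_natCast, List.map_map]
  have hlen := hpre row hrow
  have : ∀ M, M ≤ row.length → (List.range M).map ((fun j => PySem.List.pyGetD row j 0) ∘ (fun k : Nat => (k : Int))) = row.take M := by
    intro M hM
    induction M with
    | zero => simp
    | succ m ih =>
      rw [List.range_succ, List.map_append, ih (by omega), List.take_add_one]
      have hm : m < row.length := by omega
      simp [Function.comp_def, List.getD, hm]
  exact this land.length hlen

-- ===== VERDICT (by name: the statement is the Claim_ definition above) =====
theorem solution_spec : Claim_equal_solution := by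
  intro land P Q _hdom hpre
  unfold Spec_solution
  unfold Pre_solution at hpre
  have hne : ∀ row ∈ land, row ≠ [] := by
    intro row hrow h0
    have h1 := hpre row hrow
    have h2 : 0 < land.length := List.length_pos_of_mem hrow
    rw [h0] at h1
    simp only [List.length_nil] at h1
    omega
  have hcost : ∀ t, get_cost land P Q t (land.length : Int) =
      costB P Q (PySem.List.sorted (land.flatMap (fun row => row.take land.length)) (fun x => x) false)
        (prefScan (PySem.List.sorted (land.flatMap (fun row => row.take land.length)) (fun x => x) false) 0)
        (PySem.List.sorted (land.flatMap (fun row => row.take land.length)) (fun x => x) false).length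
        ((prefScan (PySem.List.sorted (land.flatMap (fun row => row.take land.length)) (fun x => x) false) 0).getD
          (PySem.List.sorted (land.flatMap (fun row => row.take land.length)) (fun x => x) false).length 0) t :=
    fun t => (get_cost_eq_sum land P Q t hpre).trans (costB_eq_sum P Q t _).symm
  simp only [solution, solution_alt]
  rw [pv_block_eq land hpre]
  rw [pv_scan_acc land hne 1111111111 0]
  rw [pv_min_sentinel, pv_max_sentinel]
  rw [pv_loop_eq land P Q (land.length : Int) _ _ _ _ hcost]
  rw [hcost, hcost, hcost, pv_min3]
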